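-- pv_equiv track=rewrite | github.com/lakazatong/SessionSim | libs/funcs.py | get_next_key
-- ===== SOURCE A (Python) =====
-- def get_next_key(string, keys):
-- 	start_index = 0
-- 	minimum_index = -1
-- 	n = len(keys)
-- 	if n > 0:
-- 		minimum_index = string.find(keys[start_index])
-- 	else:
-- 		return -1, None
-- 	while minimum_index == -1 and start_index < n-1:
-- 		start_index += 1
-- 		minimum_index = string.find(keys[start_index])
-- 	if start_index == n:
-- 		return -1, None
-- 	minimum_key = keys[start_index]
-- 	if minimum_index > 0:
-- 		for i in range(start_index+1, n):
-- 			cur_index = string.find(keys[i])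
-- 			if cur_index < minimum_index and cur_index != -1:
-- 				minimum_key = keys[i]
-- 				minimum_index = cur_index
-- 	return minimum_index, minimum_key
-- ===== SOURCE B (Python) =====
-- def get_next_key(string, keys):
-- 	# position-major scan: walk the string left to right and return the first
-- 	# position where some key starts, taking the earliest key in `keys` order.
-- 	if not keys:
-- 		return -1, None
-- 	for pos in range(len(string) + 1):
-- 		for key in keys:
-- 			if string.startswith(key, pos):
-- 				return pos, key
-- 	return -1, None
-- ===== Notes on version B (the rewrite author's own statement) =====
-- stated objective: alternative
-- what changed: B replaces A's two-phase key-major scan (skip unfound keys with str.find, then fold a strict running minimum over the remaining keys) by a position-major scan of the string: walk positions left to right and return the first position where some key starts, taking the earliest key in list order.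
-- intended difference: When keys is nonempty and no key occurs in string, A returns (-1, keys[-1]) because its guard 'if start_index == n: return -1, None' is dead code (start_index never exceeds n-1), while B returns (-1, None), the value that dead guard shows was intended. — e.g. on get_next_key("a", ["b"]): A returns (-1, some "b"), B returns (-1, none)
import Mathlib
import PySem

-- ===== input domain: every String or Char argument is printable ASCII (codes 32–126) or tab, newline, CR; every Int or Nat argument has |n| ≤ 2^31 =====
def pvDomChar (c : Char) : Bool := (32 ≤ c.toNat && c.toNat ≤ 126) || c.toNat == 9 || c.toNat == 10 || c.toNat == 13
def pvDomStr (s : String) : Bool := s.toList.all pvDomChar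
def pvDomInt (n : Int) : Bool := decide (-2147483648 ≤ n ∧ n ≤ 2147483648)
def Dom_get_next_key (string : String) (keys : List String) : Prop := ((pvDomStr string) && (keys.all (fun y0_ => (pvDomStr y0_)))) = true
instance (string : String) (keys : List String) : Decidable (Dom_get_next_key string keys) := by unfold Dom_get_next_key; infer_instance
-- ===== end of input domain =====

-- B scans the string position by position (leftmost match, earliest key) instead of A's
-- key-by-key minimum of str.find; objective: alternative. Where no key occurs A returns
-- the last key due to a dead guard, B returns None (see D_get_next_key).


-- ===== PORT A =====
-- string.find(key), on the List Char side
def gnkFind (s : List Char) (k : String) : Int := PySem.Chars.find s k.toList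

-- A's while loop: `start_index` walking forward through `keys` is ported as walking the
-- suffix `keys.drop start_index`; `start_index < n-1` is `1 < rest.length`, i.e. ≥ 2 remaining.
def gnkWhile (s : List Char) : List String → Int → List String × Int
  | [], mi => ([], mi)
  | [k], mi => ([k], mi)
  | k :: k2 :: t, mi =>
    if mi = -1 then gnkWhile s (k2 :: t) (gnkFind s k2) else (k :: k2 :: t, mi)

-- body of A's for loop, state = (minimum_key, minimum_index)
def gnkStep (s : List Char) (st : String × Int) (k : String) : String × Int :=
  let cur := gnkFind s k
  if cur < st.2 ∧ cur ≠ -1 then (k, cur) else st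

-- A after the while loop: `if start_index == n: return -1, None` (dead in Python too),
-- `minimum_key = keys[start_index]`, the guarded for loop, and the final return
def gnkAfter (s : List Char) : List String × Int → Int × Option String
  | ([], _) => (-1, none)
  | (mk :: tt, mi) =>
    if 0 < mi then
      let r := tt.foldl (gnkStep s) (mk, mi)
      (r.2, some r.1)
    else (mi, some mk)

def get_next_key (string : String) (keys : List String) : Int × Option String :=
  match keys with
  | [] => (-1, none)                                  -- n = 0: return -1, None
  | k0 :: t =>
    gnkAfter string.toList (gnkWhile string.toList (k0 :: t) (gnkFind string.toList k0))

-- ===== PORT B =====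
-- inner loop of B: first key (in order) that starts at position pos
def gnkFirstMatch (s : List Char) (pos : Nat) : List String → Option String
  | [] => none
  | k :: ks =>
    if PySem.Chars.startswith (List.drop pos s) k.toList then some k
    else gnkFirstMatch s pos ks

-- outer loop of B: for pos in range(len(string)+1), fuel = number of positions left
def gnkScanPos (s : List Char) (keys : List String) : Nat → Nat → Int × Option String
  | _, 0 => (-1, none)
  | pos, fuel+1 =>
    match gnkFirstMatch s pos keys with
    | some k => ((pos : Int), some k)
    | none => gnkScanPos s keys (pos + 1) fuel

def get_next_key_alt (string : String) (keys : List String) : Int × Option String :=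
  if keys = [] then (-1, none)
  else gnkScanPos string.toList keys 0 (string.toList.length + 1)

-- ===== PRECONDITION & SPEC =====
-- On keys lists where no key occurs in string, A returns (-1, keys[-1]) — its guard
-- `if start_index == n: return -1, None` is dead code, start_index never exceeds n-1 —
-- while B returns (-1, None), the value that dead guard shows was intended.
def D_get_next_key (string : String) (keys : List String) : Prop :=
  keys ≠ [] ∧ ∀ k ∈ keys, ¬ (k.toList <:+: string.toList)
instance (string : String) (keys : List String) : Decidable (D_get_next_key string keys) := by
  unfold D_get_next_key; infer_instance

def Spec_get_next_key (string : String) (keys : List String) (out : Int × Option String) : Prop :=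
  ¬ D_get_next_key string keys → out = get_next_key_alt string keys
instance (string : String) (keys : List String) (out : Int × Option String) : Decidable (Spec_get_next_key string keys out) := by unfold Spec_get_next_key; infer_instance

def pvDiffWitness_get_next_key : String × List String := ("a", ["b"])
def pvDiffWitnessOut_get_next_key : (Int × Option String) × (Int × Option String) :=
  ((-1, some "b"), (-1, none))

-- ===== CLAIM (what is proved, stated in full; the proofs are below) =====
def Claim_unchanged_get_next_key : Prop := ∀ (string : String) (keys : List String), Dom_get_next_key string keys → Spec_get_next_key string keys (get_next_key string keys)
def Claim_changed_get_next_key : Prop := Dom_get_next_key (pvDiffWitness_get_next_key.1) (pvDiffWitness_get_next_key.2) ∧ D_get_next_key (pvDiffWitness_get_next_key.1) (pvDiffWitness_get_next_key.2) ∧ get_next_key (pvDiffWitness_get_next_key.1) (pvDiffWitness_get_next_key.2) = pvDiffWitnessOut_get_next_key.1 ∧ get_next_key_alt (pvDiffWitness_get_next_key.1) (pvDiffWitness_get_next_key.2) = pvDiffWitnessOut_get_next_key.2 ∧ pvDiffWitnessOut_get_next_key.1 ≠ pvDiffWitnessOut_get_next_key.2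
def Claim_exact_get_next_key : Prop := ∀ (string : String) (keys : List String), Dom_get_next_key string keys → D_get_next_key string keys → get_next_key string keys ≠ get_next_key_alt string keys

-- ===== LEMMAS AND PROOFS =====

-- reference value: leftmost occurrence index and, on ties, earliest key
def gnkBestCons (fk : Int) (k : String) : Option (Int × String) → Option (Int × String)
  | none => if fk = -1 then none else some (fk, k)
  | some (m, k') => if fk = -1 then some (m, k') else if fk ≤ m then some (fk, k) else some (m, k')

def gnkBest (s : List Char) : List String → Option (Int × String)
  | [] => none
  | k :: ks => gnkBestCons (gnkFind s k) k (gnkBest s ks)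

-- result selector of A's running-minimum fold
def gnkSel (st : String × Int) : Option (Int × String) → String × Int
  | none => st
  | some (m', k') => if m' < st.2 then (k', m') else st

-- shape of A's final answer as a function of gnkBest
def gnkOut (last : String) : Option (Int × String) → Int × Option String
  | some (m, k) => (m, some k)
  | none => (-1, some last)

lemma gnkBest_none_iff (s : List Char) (keys : List String) :
    gnkBest s keys = none ↔ ∀ k ∈ keys, gnkFind s k = -1 := by
  induction keys with
  | nil => simp [gnkBest]
  | cons k ks ih =>
    cases hb : gnkBest s ks with
    | none =>
      have hks := ih.mp hb
      by_cases hf : gnkFind s k = -1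
      · have e : gnkBest s (k :: ks) = none := by
          simp [gnkBest, hb, gnkBestCons, hf]
        rw [e]
        constructor
        · rintro - x hx
          rcases List.mem_cons.mp hx with rfl | hx'
          · exact hf
          · exact hks x hx'
        · intro _; rfl
      · have e : gnkBest s (k :: ks) = some (gnkFind s k, k) := by
          simp [gnkBest, hb, gnkBestCons, hf]
        rw [e]
        constructor
        · intro hcon; exact absurd hcon (by simp)
        · intro hall; exact absurd (hall k (by simp)) hf
    | some p =>
      obtain ⟨m, k'⟩ := p
      have hP : ¬ ∀ x ∈ ks, gnkFind s x = -1 := fun hp => by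
        rw [ih.mpr hp] at hb; exact absurd hb (by simp)
      constructor
      · intro hnone
        exfalso
        simp only [gnkBest, hb, gnkBestCons] at hnone
        split_ifs at hnone
      · intro hall
        exact absurd (fun x hx => hall x (List.mem_cons_of_mem _ hx)) hP

lemma gnkBest_mem (s : List Char) {keys : List String} {m : Int} {k : String}
    (h : gnkBest s keys = some (m, k)) : k ∈ keys ∧ gnkFind s k = m := by
  induction keys generalizing m k with
  | nil => simp [gnkBest] at h
  | cons x xs ih =>
    cases hb : gnkBest s xs with
    | none =>
      simp only [gnkBest, hb, gnkBestCons] at h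
      split_ifs at h with hf
      rw [Option.some_inj, Prod.mk.injEq] at h
      obtain ⟨hm, hk⟩ := h
      subst hm; subst hk
      exact ⟨by simp, rfl⟩
    | some p =>
      obtain ⟨m0, k0⟩ := p
      simp only [gnkBest, hb, gnkBestCons] at h
      split_ifs at h with hf hle
      · rw [Option.some_inj, Prod.mk.injEq] at h
        obtain ⟨hm, hk⟩ := h
        subst hm; subst hk
        obtain ⟨hk', hf'⟩ := ih hb
        exact ⟨List.mem_cons_of_mem _ hk', hf'⟩
      · rw [Option.some_inj, Prod.mk.injEq] at h
        obtain ⟨hm, hk⟩ := h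
        subst hm; subst hk
        exact ⟨by simp, rfl⟩
      · rw [Option.some_inj, Prod.mk.injEq] at h
        obtain ⟨hm, hk⟩ := h
        subst hm; subst hk
        obtain ⟨hk', hf'⟩ := ih hb
        exact ⟨List.mem_cons_of_mem _ hk', hf'⟩

lemma gnkBest_nonneg (s : List Char) {keys : List String} {m : Int} {k : String}
    (h : gnkBest s keys = some (m, k)) : 0 ≤ m := by
  induction keys generalizing m k with
  | nil => simp [gnkBest] at h
  | cons x xs ih =>
    have hx : -1 ≤ gnkFind s x := PySem.Chars.neg_one_le_find s x.toList
    cases hb : gnkBest s xs with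
    | none =>
      simp only [gnkBest, hb, gnkBestCons] at h
      split_ifs at h with hf
      rw [Option.some_inj, Prod.mk.injEq] at h
      obtain ⟨hm, -⟩ := h
      omega
    | some p =>
      obtain ⟨m0, k0⟩ := p
      have h0 := ih hb
      simp only [gnkBest, hb, gnkBestCons] at h
      split_ifs at h with hf hle <;> rw [Option.some_inj, Prod.mk.injEq] at h <;>
        obtain ⟨hm, -⟩ := h <;> omega

lemma gnkBest_min (s : List Char) {keys : List String} {m : Int} {k : String}
    (h : gnkBest s keys = some (m, k)) :
    ∀ x ∈ keys, gnkFind s x = -1 ∨ m ≤ gnkFind s x := by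
  induction keys generalizing m k with
  | nil => simp [gnkBest] at h
  | cons x xs ih =>
    have hx : -1 ≤ gnkFind s x := PySem.Chars.neg_one_le_find s x.toList
    intro y hy
    cases hb : gnkBest s xs with
    | none =>
      simp only [gnkBest, hb, gnkBestCons] at h
      split_ifs at h with hf
      rw [Option.some_inj, Prod.mk.injEq] at h
      obtain ⟨hm, -⟩ := h
      rcases List.mem_cons.mp hy with rfl | hy'
      · right; omega
      · left; exact (gnkBest_none_iff s xs).mp hb y hy'
    | some p =>
      obtain ⟨m0, k0⟩ := p
      have hmin0 := ih hb
      simp only [gnkBest, hb, gnkBestCons] at h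
      split_ifs at h with hf hle
      · rw [Option.some_inj, Prod.mk.injEq] at h
        obtain ⟨hm, -⟩ := h
        subst hm
        rcases List.mem_cons.mp hy with rfl | hy'
        · left; exact hf
        · exact hmin0 y hy'
      · rw [Option.some_inj, Prod.mk.injEq] at h
        obtain ⟨hm, -⟩ := h
        subst hm
        rcases List.mem_cons.mp hy with rfl | hy'
        · right; omega
        · rcases hmin0 y hy' with h1 | h1
          · left; exact h1
          · right; omega
      · rw [Option.some_inj, Prod.mk.injEq] at h
        obtain ⟨hm, -⟩ := h
        subst hm
        rcases List.mem_cons.mp hy with rfl | hy'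
        · right; omega
        · exact hmin0 y hy'

-- A's for-loop computes the strict running minimum: characterised by gnkBest of the tail
lemma gnkFoldl_char (s : List Char) (t : List String) (st : String × Int) :
    t.foldl (gnkStep s) st = gnkSel st (gnkBest s t) := by
  induction t generalizing st with
  | nil => simp [gnkBest, gnkSel]
  | cons x xs ih =>
    obtain ⟨k, mi⟩ := st
    have hx : -1 ≤ gnkFind s x := PySem.Chars.neg_one_le_find s x.toList
    rw [List.foldl_cons, ih]
    simp only [gnkStep, gnkBest]
    cases hb : gnkBest s xs with
    | none =>
      by_cases hc : gnkFind s x < mi ∧ gnkFind s x ≠ -1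
      · rw [if_pos hc]
        simp only [gnkBestCons, gnkSel, if_neg hc.2]
        rw [if_pos hc.1]
      · rw [if_neg hc]
        by_cases hf : gnkFind s x = -1
        · simp [gnkBestCons, gnkSel, hf]
        · have h1 : ¬ gnkFind s x < mi := fun hlt => hc ⟨hlt, hf⟩
          simp only [gnkBestCons, gnkSel, if_neg hf]
          rw [if_neg h1]
    | some p =>
      obtain ⟨m0, k0⟩ := p
      have h0 : 0 ≤ m0 := gnkBest_nonneg s hb
      by_cases hc : gnkFind s x < mi ∧ gnkFind s x ≠ -1
      · rw [if_pos hc]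
        simp only [gnkBestCons, gnkSel, if_neg hc.2]
        by_cases hle : gnkFind s x ≤ m0
        · rw [if_pos hle]
          simp only [gnkSel]
          rw [if_neg (by omega : ¬ m0 < gnkFind s x), if_pos hc.1]
        · rw [if_neg hle]
          simp only [gnkSel]
          rw [if_pos (by omega : m0 < gnkFind s x), if_pos (by omega : m0 < mi)]
      · rw [if_neg hc]
        by_cases hf : gnkFind s x = -1
        · simp [gnkBestCons, gnkSel, hf]
        · have h1 : ¬ gnkFind s x < mi := fun hlt => hc ⟨hlt, hf⟩
          simp only [gnkBestCons, gnkSel, if_neg hf]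
          by_cases hle : gnkFind s x ≤ m0
          · rw [if_pos hle]
            simp only [gnkSel]
            rw [if_neg h1, if_neg (by omega : ¬ m0 < mi)]
          · rw [if_neg hle]

-- A's whole computation on nonempty keys equals gnkBest
lemma gnkA_char (s : List Char) (t : List String) (k0 : String) :
    gnkAfter s (gnkWhile s (k0 :: t) (gnkFind s k0))
      = gnkOut (t.getLastD k0) (gnkBest s (k0 :: t)) := by
  induction t generalizing k0 with
  | nil =>
    have hx : -1 ≤ gnkFind s k0 := PySem.Chars.neg_one_le_find s k0.toList
    simp only [gnkWhile, gnkAfter, gnkBest, gnkBestCons, List.foldl_nil, List.getLastD_nil]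
    by_cases hf : gnkFind s k0 = -1
    · simp [hf, gnkOut]
    · by_cases h0 : 0 < gnkFind s k0 <;> simp [hf, h0, gnkOut]
  | cons k1 tt ih =>
    have e : gnkBest s (k0 :: k1 :: tt)
        = gnkBestCons (gnkFind s k0) k0 (gnkBest s (k1 :: tt)) := rfl
    by_cases hf : gnkFind s k0 = -1
    · have hw : gnkWhile s (k0 :: k1 :: tt) (gnkFind s k0)
          = gnkWhile s (k1 :: tt) (gnkFind s k1) := by
        simp [gnkWhile, hf]
      have hbcons : gnkBest s (k0 :: k1 :: tt) = gnkBest s (k1 :: tt) := by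
        rw [e]
        cases hb : gnkBest s (k1 :: tt) with
        | none => simp [gnkBestCons, hf]
        | some p => obtain ⟨m0, q0⟩ := p; simp [gnkBestCons, hf]
      rw [hw, ih k1, hbcons, List.getLastD_cons]
    · have hx : -1 ≤ gnkFind s k0 := PySem.Chars.neg_one_le_find s k0.toList
      have hw : gnkWhile s (k0 :: k1 :: tt) (gnkFind s k0)
          = (k0 :: k1 :: tt, gnkFind s k0) := by
        simp [gnkWhile, hf]
      rw [hw, e]
      cases hb : gnkBest s (k1 :: tt) with
      | none =>
        simp only [gnkAfter, gnkFoldl_char, hb, gnkSel, gnkBestCons, if_neg hf]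
        by_cases h0 : 0 < gnkFind s k0 <;> simp [h0, gnkOut]
      | some p =>
        obtain ⟨m0, q0⟩ := p
        have h0' : 0 ≤ m0 := gnkBest_nonneg s hb
        simp only [gnkAfter, gnkFoldl_char, hb, gnkSel, gnkBestCons, if_neg hf]
        by_cases h0 : 0 < gnkFind s k0
        · by_cases hlt : m0 < gnkFind s k0
          · rw [if_pos h0, if_pos hlt, if_neg (by omega : ¬ gnkFind s k0 ≤ m0)]
            simp [gnkOut]
          · rw [if_pos h0, if_neg hlt, if_pos (by omega : gnkFind s k0 ≤ m0)]
            simp [gnkOut]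
        · rw [if_neg h0, if_pos (by omega : gnkFind s k0 ≤ m0)]
          simp [gnkOut]

-- prefix at position j bounds find from above (and shows the key occurs)
lemma gnkFind_le_of_prefix (s : List Char) {x : String} {j : Nat}
    (h : x.toList <+: List.drop j s) : 0 ≤ gnkFind s x ∧ gnkFind s x ≤ (j : Int) := by
  have hin : PySem.Chars.isIn x.toList s = true :=
    (PySem.Chars.exists_prefix_drop_iff_isIn x.toList s).mp ⟨j, h⟩
  have h0 : (0 : Int) ≤ PySem.Chars.find s x.toList := by
    rw [PySem.Chars.find_nonneg_iff]
    exact (PySem.Chars.isIn_iff_infix x.toList s).mp hin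
  refine ⟨h0, ?_⟩
  have hspec := (PySem.Chars.find_spec h0).2
  show PySem.Chars.find s x.toList ≤ (j : Int)
  by_contra hlt
  exact hspec j (by omega : j < (PySem.Chars.find s x.toList).toNat) h

-- startswith at the find index: find points at an occurrence
lemma gnkStart_of_eq (s : List Char) {y : String} {m : Int}
    (h0 : 0 ≤ m) (hy : gnkFind s y = m) :
    PySem.Chars.startswith (List.drop m.toNat s) y.toList = true := by
  have hy' : PySem.Chars.find s y.toList = m := hy
  have h0' : (0 : Int) ≤ PySem.Chars.find s y.toList := by omega
  have hpre := (PySem.Chars.find_spec h0').1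
  rw [PySem.Chars.startswith_iff]
  rw [hy'] at hpre
  exact hpre

-- startswith at position m bounds find by m
lemma gnkLe_of_start (s : List Char) {y : String} {m : Int} (h0 : 0 ≤ m)
    (hy : PySem.Chars.startswith (List.drop m.toNat s) y.toList = true) :
    0 ≤ gnkFind s y ∧ gnkFind s y ≤ m := by
  obtain ⟨ha, hb⟩ := gnkFind_le_of_prefix s ((PySem.Chars.startswith_iff _ _).mp hy)
  exact ⟨ha, by omega⟩

lemma gnkFirstMatch_none_iff (s : List Char) (p : Nat) (keys : List String) :
    gnkFirstMatch s p keys = none ↔ ∀ x ∈ keys, ¬ (x.toList <+: List.drop p s) := by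
  induction keys with
  | nil => simp [gnkFirstMatch]
  | cons x xs ih =>
    simp only [gnkFirstMatch]
    by_cases hs : PySem.Chars.startswith (List.drop p s) x.toList = true
    · rw [if_pos hs]
      constructor
      · intro h; exact absurd h (by simp)
      · intro hall
        exact absurd ((PySem.Chars.startswith_iff _ _).mp hs) (hall x (by simp))
    · rw [if_neg hs, ih]
      constructor
      · rintro h x' hx'
        rcases List.mem_cons.mp hx' with rfl | hx''
        · intro hpre
          exact hs ((PySem.Chars.startswith_iff _ _).mpr hpre)
        · exact h x' hx''
      · intro h x' hx'
        exact h x' (List.mem_cons_of_mem _ hx')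

lemma gnkFirstMatch_best (s : List Char) {keys : List String} {m : Int} {k : String}
    (h : gnkBest s keys = some (m, k))
    (hmin : ∀ x ∈ keys, gnkFind s x = -1 ∨ m ≤ gnkFind s x) :
    gnkFirstMatch s m.toNat keys = some k := by
  induction keys generalizing m k with
  | nil => simp [gnkBest] at h
  | cons x xs ih =>
    have hx : -1 ≤ gnkFind s x := PySem.Chars.neg_one_le_find s x.toList
    have hm0 : 0 ≤ m := gnkBest_nonneg s h
    cases hb : gnkBest s xs with
    | none =>
      simp only [gnkBest, hb, gnkBestCons] at h
      split_ifs at h with hf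
      rw [Option.some_inj, Prod.mk.injEq] at h
      obtain ⟨hm, hk⟩ := h
      subst hm; subst hk
      simp only [gnkFirstMatch]
      rw [if_pos (gnkStart_of_eq s hm0 rfl)]
    | some p =>
      obtain ⟨m0, k0⟩ := p
      simp only [gnkBest, hb, gnkBestCons] at h
      split_ifs at h with hf hle <;> rw [Option.some_inj, Prod.mk.injEq] at h <;>
          obtain ⟨hm, hk⟩ := h <;> subst hm <;> subst hk
      · have hno : ¬ PySem.Chars.startswith (List.drop m0.toNat s) x.toList = true := by
          intro hcon
          obtain ⟨hc0, -⟩ := gnkLe_of_start s hm0 hcon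
          omega
        simp only [gnkFirstMatch]
        rw [if_neg hno]
        exact ih hb (fun y hy => hmin y (List.mem_cons_of_mem _ hy))
      · simp only [gnkFirstMatch]
        rw [if_pos (gnkStart_of_eq s hm0 rfl)]
      · have hno : ¬ PySem.Chars.startswith (List.drop m0.toNat s) x.toList = true := by
          intro hcon
          obtain ⟨hc0, hcle⟩ := gnkLe_of_start s hm0 hcon
          omega
        simp only [gnkFirstMatch]
        rw [if_neg hno]
        exact ih hb (fun y hy => hmin y (List.mem_cons_of_mem _ hy))

lemma gnkFirstMatch_before (s : List Char) {keys : List String} {m : Int} {k : String}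
    (h : gnkBest s keys = some (m, k)) {p : Nat} (hp : (p : Int) < m) :
    gnkFirstMatch s p keys = none := by
  rw [gnkFirstMatch_none_iff]
  intro x hx hpre
  obtain ⟨h0, hle⟩ := gnkFind_le_of_prefix s hpre
  rcases gnkBest_min s h x hx with h1 | h1 <;> omega

lemma gnkScanPos_reach (s : List Char) {keys : List String} {m : Int} {k : String}
    (h : gnkBest s keys = some (m, k)) :
    ∀ (fuel pos : Nat), (pos : Int) ≤ m → m.toNat < pos + fuel →
      gnkScanPos s keys pos fuel = (m, some k) := by
  intro fuel
  induction fuel with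
  | zero =>
    intro pos hle hlt
    have hm0 : 0 ≤ m := gnkBest_nonneg s h
    omega
  | succ n ih =>
    intro pos hle hlt
    have hm0 : 0 ≤ m := gnkBest_nonneg s h
    by_cases hpos : (pos : Int) = m
    · have hp : pos = m.toNat := by omega
      have hsome : gnkFirstMatch s pos keys = some k := by
        rw [hp]; exact gnkFirstMatch_best s h (gnkBest_min s h)
      simp only [gnkScanPos, hsome]
      rw [hpos]
    · have hnone : gnkFirstMatch s pos keys = none :=
        gnkFirstMatch_before s h (by omega)
      simp only [gnkScanPos, hnone]
      exact ih (pos + 1) (by omega) (by omega)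

lemma gnkScanPos_none (s : List Char) {keys : List String}
    (h : ∀ p : Nat, gnkFirstMatch s p keys = none) :
    ∀ (fuel pos : Nat), gnkScanPos s keys pos fuel = (-1, none) := by
  intro fuel
  induction fuel with
  | zero => intro pos; simp [gnkScanPos]
  | succ n ih =>
    intro pos
    simp only [gnkScanPos, h pos]
    exact ih (pos + 1)

lemma gnkB_some (string : String) {keys : List String} {m : Int} {k : String}
    (hne : keys ≠ []) (h : gnkBest string.toList keys = some (m, k)) :
    get_next_key_alt string keys = (m, some k) := by
  have hm0 : 0 ≤ m := gnkBest_nonneg _ h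
  obtain ⟨-, hfk⟩ := gnkBest_mem _ h
  have hlen : PySem.Chars.find string.toList k.toList ≤ (string.toList.length : Int) :=
    PySem.Chars.find_le_length string.toList k.toList
  have hfk' : PySem.Chars.find string.toList k.toList = m := hfk
  simp only [get_next_key_alt, if_neg hne]
  exact gnkScanPos_reach _ h (string.toList.length + 1) 0 (by omega) (by omega)

-- ===== VERDICT (by name: the statement is the Claim_ definition above) =====
theorem get_next_key_spec : Claim_unchanged_get_next_key := by
  intro string keys _ hnD
  cases keys with
  | nil => simp [get_next_key, get_next_key_alt]
  | cons k0 t =>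
    cases hb : gnkBest string.toList (k0 :: t) with
    | none =>
      exfalso
      apply hnD
      refine ⟨by simp, fun k hk => ?_⟩
      have h2 : PySem.Chars.find string.toList k.toList = -1 :=
        (gnkBest_none_iff string.toList (k0 :: t)).mp hb k hk
      rw [PySem.Chars.find_eq_neg_one_iff] at h2
      exact h2
    | some p =>
      obtain ⟨m, k⟩ := p
      rw [gnkB_some string (by simp) hb]
      show get_next_key string (k0 :: t) = (m, some k)
      simp only [get_next_key]
      rw [gnkA_char, hb]
      rfl

theorem get_next_key_changed : Claim_changed_get_next_key := by
  unfold Claim_changed_get_next_key; decide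

theorem get_next_key_tight : Claim_exact_get_next_key := by
  intro string keys _ hD
  obtain ⟨hne, hnin⟩ := hD
  have hb : gnkBest string.toList keys = none :=
    (gnkBest_none_iff _ _).mpr fun k hk =>
      show PySem.Chars.find string.toList k.toList = -1 by
        rw [PySem.Chars.find_eq_neg_one_iff]
        exact hnin k hk
  have hBv : get_next_key_alt string keys = (-1, none) := by
    simp only [get_next_key_alt, if_neg hne]
    refine gnkScanPos_none _ (fun p => ?_) _ _
    rw [gnkFirstMatch_none_iff]
    intro x hx hpre
    have hin : PySem.Chars.isIn x.toList string.toList = true :=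
      (PySem.Chars.exists_prefix_drop_iff_isIn x.toList string.toList).mp ⟨p, hpre⟩
    exact hnin x hx ((PySem.Chars.isIn_iff_infix x.toList string.toList).mp hin)
  cases keys with
  | nil => exact absurd rfl hne
  | cons k0 t =>
    have hAv : get_next_key string (k0 :: t) = (-1, some (t.getLastD k0)) := by
      simp only [get_next_key]
      rw [gnkA_char, hb]
      rfl
    rw [hAv, hBv]
    simp
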